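-- pv_equiv track=rewrite | github.com/formascience/class_parser | pdf_extractor/processor.py | _clean_fragmented_text
-- ===== SOURCE A (Python) =====
-- def _clean_fragmented_text(text: str) -> str:
--     """
--     Clean up fragmented text where characters are separated by spaces.
--     Example: "h e l l o   w o r l d" -> "hello world"
--     """
--     if not text:
--         return text
--
--     # Split into words/tokens
--     words = text.split()
--     if len(words) <= 2:
--         return text
--
--     # Count single characters (letters, numbers, or common punctuation)
--     single_char_count = sum(1 for word in words
--                            if len(word) == 1 and (word.isalnum() or word in ".,;:!?()[]{}"))
--
--     # If more than 50% are single characters, treat as fragmented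
--     if single_char_count / len(words) > 0.5:
--         result = []
--         current_word = ""
--
--         for i, word in enumerate(words):
--             # Single character that should be merged
--             if len(word) == 1 and word.isalnum():
--                 current_word += word
--             # Single punctuation - end current word and add punctuation
--             elif len(word) == 1 and word in ".,;:!?":
--                 if current_word:
--                     result.append(current_word)
--                     current_word = ""
--                 result.append(word)
--             # Multi-character word or special cases
--             else:
--                 if current_word:
--                     result.append(current_word)
--                     current_word = ""
--                 result.append(word)
--
--         # Don't forget the last word
--         if current_word:
--             result.append(current_word)
--
--         return " ".join(result)
--
--     return text
-- ===== SOURCE B (Python) =====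
-- def _clean_fragmented_text(text: str) -> str:
--     """Run-partition rewrite: merge maximal runs of single alnum chars instead of a running accumulator."""
--     if not text:
--         return text
--     words = text.split()
--     if len(words) <= 2:
--         return text
--     single_char_count = sum(1 for word in words
--                             if len(word) == 1 and (word.isalnum() or word in ".,;:!?()[]{}"))
--     # integer form of A's float test single_char_count / len(words) > 0.5 (exact)
--     if 2 * single_char_count > len(words):
--         pieces = []
--         i, n = 0, len(words)
--         while i < n:
--             w = words[i]
--             if len(w) == 1 and w.isalnum():
--                 j = i + 1
--                 while j < n and len(words[j]) == 1 and words[j].isalnum():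
--                     j += 1
--                 pieces.append("".join(words[i:j]))
--                 i = j
--             else:
--                 pieces.append(w)
--                 i += 1
--         return " ".join(pieces)
--     return text
-- ===== Notes on version B (the rewrite author's own statement) =====
-- stated objective: alternative
-- what changed: Replaced the running current_word accumulator loop (with separate punctuation/other flush branches) by a run-partition scan: each maximal run of single alphanumeric tokens is located with an inner scan and joined at once, other tokens are emitted individually; the 50% float test becomes the exact integer comparison 2*count > len(words).
import Mathlib
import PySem

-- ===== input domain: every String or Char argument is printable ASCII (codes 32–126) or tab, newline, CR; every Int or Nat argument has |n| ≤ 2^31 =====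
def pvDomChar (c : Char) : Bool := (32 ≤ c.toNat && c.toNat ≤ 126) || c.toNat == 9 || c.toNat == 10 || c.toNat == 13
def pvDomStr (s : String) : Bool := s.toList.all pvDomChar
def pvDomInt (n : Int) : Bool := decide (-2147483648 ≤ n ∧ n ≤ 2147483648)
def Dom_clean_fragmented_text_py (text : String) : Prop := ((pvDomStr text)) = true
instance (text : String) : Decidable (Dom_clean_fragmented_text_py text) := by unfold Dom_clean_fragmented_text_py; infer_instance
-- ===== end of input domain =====

-- B replaces A's running current_word accumulator by a run-partition scan (maximal runs of
-- single alnum tokens joined at once); same output, same cost (objective: alternative).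


-- ===== PORT A =====
-- len(word) == 1 and (word.isalnum() or word in ".,;:!?()[]{}")
def pvCountPredA (w : List Char) : Bool :=
  PySem.Chars.len w == 1 && (PySem.Chars.strIsalnum w || PySem.Chars.isIn w ".,;:!?()[]{}".toList)

-- A's for-loop: state = (result, current_word); branches in A's order
def pvStepA (st : List (List Char) × List Char) (w : List Char) : List (List Char) × List Char :=
  if PySem.Chars.len w == 1 && PySem.Chars.strIsalnum w then
    (st.1, st.2 ++ w)
  else if PySem.Chars.len w == 1 && PySem.Chars.isIn w ".,;:!?".toList then
    ((if st.2 = [] then st.1 else st.1 ++ [st.2]) ++ [w], [])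
  else
    ((if st.2 = [] then st.1 else st.1 ++ [st.2]) ++ [w], [])

def clean_fragmented_text_py (text : String) : String :=
  if text = "" then text
  else
    let words := PySem.Chars.split₀ text.toList
    if words.length ≤ 2 then text
    else
      -- sum(1 for word in words if …) = count of words satisfying the predicate
      let single_char_count := words.countP pvCountPredA
      -- float test single_char_count / len(words) > 0.5 is EXACT as 2*count > len here:
      -- the true ratio is ≥ 0.5 + 1/(2n) or ≤ 0.5, both beyond double rounding error
      if 2 * single_char_count > words.length then
        let st := words.foldl pvStepA ([], [])
        let result := if st.2 = [] then st.1 else st.1 ++ [st.2]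
        String.ofList (PySem.Chars.join [' '] result)
      else text

-- ===== PORT B =====
-- len(w) == 1 and w.isalnum()
def pvMergeableB (w : List Char) : Bool :=
  PySem.Chars.len w == 1 && PySem.Chars.strIsalnum w

-- B's while-loop over indices: the inner 'while j' scan is takeWhile/dropWhile of the suffix
def pvRunsB : List (List Char) → List (List Char)
  | [] => []
  | w :: rest =>
    if pvMergeableB w then
      PySem.Chars.join [] (w :: rest.takeWhile pvMergeableB)
        :: pvRunsB (rest.dropWhile pvMergeableB)
    else
      w :: pvRunsB rest
termination_by ws => ws.length
decreasing_by
  · exact Nat.lt_succ_of_le (List.length_dropWhile_le _ _)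
  · simp

def clean_fragmented_text_py_alt (text : String) : String :=
  if text = "" then text
  else
    let words := PySem.Chars.split₀ text.toList
    if words.length ≤ 2 then text
    else
      let single_char_count := words.countP pvCountPredA
      if 2 * single_char_count > words.length then
        String.ofList (PySem.Chars.join [' '] (pvRunsB words))
      else text

-- ===== PRECONDITION & SPEC =====
def Spec_clean_fragmented_text_py (text : String) (out : String) : Prop := out = clean_fragmented_text_py_alt text
instance (text : String) (out : String) : Decidable (Spec_clean_fragmented_text_py text out) := by unfold Spec_clean_fragmented_text_py; infer_instance

-- ===== CLAIM (what is proved, stated in full; the proofs are below) =====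
def Claim_equal_clean_fragmented_text_py : Prop := ∀ (text : String), Dom_clean_fragmented_text_py text → Spec_clean_fragmented_text_py text (clean_fragmented_text_py text)

-- ===== LEMMAS AND PROOFS =====

-- A's loop viewed from a pending current_word: recursion the foldl unrolls to
def pvMergeCont (cur : List Char) : List (List Char) → List (List Char)
  | [] => if cur = [] then [] else [cur]
  | w :: rest =>
    if pvMergeableB w then pvMergeCont (cur ++ w) rest
    else (if cur = [] then [] else [cur]) ++ w :: pvMergeCont [] rest

lemma pvMergeable_ne_nil {w : List Char} (h : pvMergeableB w = true) : w ≠ [] := by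
  rcases w with _ | ⟨c, cs⟩
  · simp [pvMergeableB, PySem.Chars.len, PySem.Chars.strIsalnum] at h
  · simp

lemma pvJoinNil_cons (w : List Char) (ts : List (List Char)) :
    PySem.Chars.join [] (w :: ts) = w ++ PySem.Chars.join [] ts := by
  cases ts <;>
    simp [PySem.Chars.join_nil, PySem.Chars.join_singleton, PySem.Chars.join_cons_cons]

-- mergeCont [] = pvRunsB, and with a nonempty pending word it prepends into the first run
lemma pvMergeCont_spec (ws : List (List Char)) :
    pvMergeCont [] ws = pvRunsB ws ∧
    ∀ cur, cur ≠ [] →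
      pvMergeCont cur ws =
        (cur ++ PySem.Chars.join [] (ws.takeWhile pvMergeableB))
          :: pvRunsB (ws.dropWhile pvMergeableB) := by
  induction ws with
  | nil =>
    constructor
    · simp [pvMergeCont, pvRunsB]
    · intro cur hcur
      simp [pvMergeCont, pvRunsB, hcur, PySem.Chars.join_nil]
  | cons w rest ih =>
    by_cases hm : pvMergeableB w = true
    · have hw := pvMergeable_ne_nil hm
      constructor
      · rw [pvMergeCont, if_pos hm, List.nil_append, ih.2 w hw, pvRunsB, if_pos hm,
          pvJoinNil_cons]
      · intro cur hcur
        rw [pvMergeCont, if_pos hm, ih.2 (cur ++ w) (by simp [hw]),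
          List.takeWhile_cons_of_pos hm, List.dropWhile_cons_of_pos hm, pvJoinNil_cons]
        simp
    · constructor
      · rw [pvMergeCont, if_neg hm, pvRunsB, if_neg hm, ih.1]
        simp
      · intro cur hcur
        rw [pvMergeCont, if_neg hm, List.takeWhile_cons_of_neg hm,
          List.dropWhile_cons_of_neg hm, pvRunsB, if_neg hm, ih.1]
        simp [hcur, PySem.Chars.join_nil]

-- A's foldl with final flush computes res ++ pvMergeCont cur
lemma pvFoldA_eq (ws : List (List Char)) : ∀ (res : List (List Char)) (cur : List Char),
    (if (ws.foldl pvStepA (res, cur)).2 = [] then (ws.foldl pvStepA (res, cur)).1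
     else (ws.foldl pvStepA (res, cur)).1 ++ [(ws.foldl pvStepA (res, cur)).2])
      = res ++ pvMergeCont cur ws := by
  induction ws with
  | nil => intro res cur; by_cases h : cur = [] <;> simp [pvMergeCont, h]
  | cons w rest ih =>
    intro res cur
    simp only [List.foldl_cons, pvStepA, pvMergeCont]
    by_cases h1 : (PySem.Chars.len w == 1 && PySem.Chars.strIsalnum w) = true
    · rw [if_pos h1, if_pos (show pvMergeableB w = true from h1), ih]
    · rw [if_neg h1, if_neg (show ¬ pvMergeableB w = true from h1)]
      by_cases h2 : (PySem.Chars.len w == 1 && PySem.Chars.isIn w ".,;:!?".toList) = true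
      · rw [if_pos h2, ih]
        by_cases hc : cur = [] <;> simp [hc]
      · rw [if_neg h2, ih]
        by_cases hc : cur = [] <;> simp [hc]

-- ===== VERDICT (by name: the statement is the Claim_ definition above) =====
theorem clean_fragmented_text_py_spec : Claim_equal_clean_fragmented_text_py := by
  intro text _
  show clean_fragmented_text_py text = clean_fragmented_text_py_alt text
  unfold clean_fragmented_text_py clean_fragmented_text_py_alt
  by_cases h0 : text = ""
  · simp [h0]
  rw [if_neg h0, if_neg h0]
  by_cases h1 : (PySem.Chars.split₀ text.toList).length ≤ 2
  · rw [if_pos h1, if_pos h1]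
  rw [if_neg h1, if_neg h1]
  by_cases h2 : 2 * (PySem.Chars.split₀ text.toList).countP pvCountPredA
      > (PySem.Chars.split₀ text.toList).length
  · rw [if_pos h2, if_pos h2]
    show String.ofList (PySem.Chars.join [' ']
        (if ((PySem.Chars.split₀ text.toList).foldl pvStepA ([], [])).2 = []
         then ((PySem.Chars.split₀ text.toList).foldl pvStepA ([], [])).1
         else ((PySem.Chars.split₀ text.toList).foldl pvStepA ([], [])).1
              ++ [((PySem.Chars.split₀ text.toList).foldl pvStepA ([], [])).2])) = _
    rw [pvFoldA_eq, List.nil_append, (pvMergeCont_spec _).1]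
  · rw [if_neg h2, if_neg h2]
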